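-- pv_equiv track=rewrite | github.com/armpit-symphony/Sparkbot | backend/app/services/guardian/retrieval_eval.py | _terms_from_text
-- ===== SOURCE A (Python) =====
-- def _terms_from_text(text: str, limit: int = 5) -> tuple[str, ...]:
--     terms: list[str] = []
--     for raw in text.replace("_", " ").replace("-", " ").split():
--         term = "".join(ch for ch in raw.lower() if ch.isalnum())
--         if len(term) < 4 or term in terms:
--             continue
--         terms.append(term)
--         if len(terms) >= limit:
--             break
--     return tuple(terms)
-- ===== SOURCE B (Python) =====
-- def _terms_from_text(text: str, limit: int = 5) -> tuple[str, ...]: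
--     terms: dict[str, None] = {}
--     cur: list[str] = []
--     for ch in text + " ":
--         if ch == "_" or ch == "-" or ch.isspace():
--             if len(cur) >= 4:
--                 term = "".join(cur)
--                 if term not in terms:
--                     terms[term] = None
--                     if len(terms) >= limit:
--                         break
--             cur = []
--         else:
--             lc = ch.lower()
--             if lc.isalnum():
--                 cur.append(lc)
--     return tuple(terms)
-- ===== Notes on version B (the rewrite author's own statement) =====
-- stated objective: alternative
-- what changed: B replaces A's staged replace/split/lower/join-per-token pipeline with a single character-level state machine that tokenises on underscore, hyphen and whitespace, accumulates the lowercased alphanumeric characters of the current token, and flushes/dedups/limits at each separator in one pass over the text.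
import Mathlib
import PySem

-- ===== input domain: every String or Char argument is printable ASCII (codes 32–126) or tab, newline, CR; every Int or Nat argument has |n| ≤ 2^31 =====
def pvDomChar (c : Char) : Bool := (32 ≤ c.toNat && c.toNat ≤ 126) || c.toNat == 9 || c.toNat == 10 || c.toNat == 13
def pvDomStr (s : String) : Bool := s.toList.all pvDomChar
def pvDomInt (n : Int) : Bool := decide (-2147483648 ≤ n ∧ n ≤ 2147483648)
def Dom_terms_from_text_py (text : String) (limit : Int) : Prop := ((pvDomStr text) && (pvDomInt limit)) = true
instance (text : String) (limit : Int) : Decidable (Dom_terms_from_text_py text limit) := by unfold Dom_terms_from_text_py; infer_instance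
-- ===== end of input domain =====

-- B replaces A's replace/split/join token pipeline with a single character-level state machine
-- that tokenises, cleans and deduplicates in one pass over the text; alternative, not measured faster.

-- ===== PORT A =====
-- ''.join(ch for ch in raw.lower() if ch.isalnum())
def pvCleanA (raw : String) : String :=
  String.ofList ((PySem.Chars.lower raw.toList).filter PySem.Chars.isalnum)

-- A's for-loop with continue/break over the token list
def loopA (limit : Int) : List String → List String → List String
  | [], terms => terms
  | raw :: rest, terms =>
    let term := pvCleanA raw
    if PySem.Str.len term < 4 ∨ term ∈ terms then loopA limit rest terms
    else
      let terms' := terms ++ [term]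
      if limit ≤ PySem.List.len terms' then terms' else loopA limit rest terms'

def terms_from_text_py (text : String) (limit : Int) : List String :=
  loopA limit (PySem.Str.split₀ (PySem.Str.replace (PySem.Str.replace text "_" " ") "-" " ")) []

-- ===== PORT B =====
-- B's character state machine: cur = cleaned chars of the current token, terms = accepted terms
def scanB (limit : Int) : List Char → List Char → List String → List String
  | [], _cur, terms => terms
  | c :: rest, cur, terms =>
    if c = '_' ∨ c = '-' ∨ PySem.Chars.isspace c then
      if 4 ≤ cur.length then
        let term := String.ofList cur
        if term ∈ terms then scanB limit rest [] terms
        else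
          let terms' := terms ++ [term]
          if limit ≤ PySem.List.len terms' then terms' else scanB limit rest [] terms'
      else scanB limit rest [] terms
    else
      let lc := PySem.Chars.lowerChar c
      if PySem.Chars.isalnum lc then scanB limit rest (cur ++ [lc]) terms
      else scanB limit rest cur terms

-- 'for ch in text + " "' iterates the characters of text and then a space sentinel
def terms_from_text_py_alt (text : String) (limit : Int) : List String :=
  scanB limit (text.toList ++ [' ']) [] []

-- ===== PRECONDITION & SPEC =====
def Spec_terms_from_text_py (text : String) (limit : Int) (out : List String) : Prop := out = terms_from_text_py_alt text limit
instance (text : String) (limit : Int) (out : List String) : Decidable (Spec_terms_from_text_py text limit out) := by unfold Spec_terms_from_text_py; infer_instance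

-- ===== CLAIM (what is proved, stated in full; the proofs are below) =====
def Claim_equal_terms_from_text_py : Prop := ∀ (text : String) (limit : Int), Dom_terms_from_text_py text limit → Spec_terms_from_text_py text limit (terms_from_text_py text limit)

-- ===== LEMMAS AND PROOFS =====

-- the combined effect of the two single-char replaces
def pvSwap (c : Char) : Char := if c = '_' ∨ c = '-' then ' ' else c

-- cleaned form of a raw token, list side
def pvClean (l : List Char) : List Char := (l.map PySem.Chars.lowerChar).filter PySem.Chars.isalnum

-- the tokens split₀ still has to emit, given reversed current token cur
def tok : List Char → List Char → List (List Char)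
  | [], cur => if cur = [] then [] else [cur.reverse]
  | c :: rest, cur =>
    if PySem.Chars.isspace c then (if cur = [] then tok rest [] else cur.reverse :: tok rest [])
    else tok rest (c :: cur)

lemma replace_go_single (o n : Char) : ∀ (l : List Char) (fuel : Nat) (acc : List Char),
    l.length ≤ fuel →
    PySem.Chars.replace.go [o] [n] fuel l acc
      = acc.reverse ++ l.map (fun c => if c = o then n else c) := by
  intro l
  induction l with
  | nil =>
    intro fuel acc _
    cases fuel <;> simp [PySem.Chars.replace.go]
  | cons c t ih =>
    intro fuel acc h
    cases fuel with
    | zero => simp at h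
    | succ f =>
      simp only [PySem.Chars.replace.go, List.isPrefixOf, List.map_cons]
      by_cases hc : c = o
      · have hbeq : (o == c) = true := by simp [hc]
        simp only [hbeq, Bool.true_and, if_pos, List.drop_succ_cons, List.drop_zero,
          List.reverse_singleton, List.singleton_append]
        rw [show List.drop [o].length (c :: t) = t from rfl, ih f (n :: acc) (by simpa using h)]
        simp [hc]
      · have hbeq : (o == c) = false := beq_eq_false_iff_ne.mpr (Ne.symm hc)
        simp only [hbeq, Bool.false_and, Bool.false_eq_true, if_neg, not_false_iff]
        rw [ih f (c :: acc) (by simpa using h)]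
        simp [hc]

lemma replace_single (o n : Char) (l : List Char) :
    PySem.Chars.replace l [o] [n] = l.map (fun c => if c = o then n else c) := by
  simp [PySem.Chars.replace, replace_go_single o n l l.length [] le_rfl]

lemma split₀_go_tok : ∀ (cs cur : List Char) (acc : List (List Char)),
    PySem.Chars.split₀.go cs cur acc = acc.reverse ++ tok cs cur := by
  intro cs
  induction cs with
  | nil =>
    intro cur acc
    by_cases h : cur = [] <;> simp [PySem.Chars.split₀.go, tok, h]
  | cons c rest ih =>
    intro cur acc
    by_cases hs : PySem.Chars.isspace c
    · by_cases h : cur = [] <;> simp [PySem.Chars.split₀.go, tok, hs, h, ih]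
    · simp [PySem.Chars.split₀.go, tok, hs, ih]

lemma pvCleanA_ofList (l : List Char) : pvCleanA (String.ofList l) = String.ofList (pvClean l) := by
  simp [pvCleanA, pvClean, PySem.Chars.lower]

lemma pvClean_append_one (r : List Char) (c : Char) :
    pvClean (r ++ [c])
      = pvClean r ++ (if PySem.Chars.isalnum (PySem.Chars.lowerChar c) then [PySem.Chars.lowerChar c] else []) := by
  by_cases h : PySem.Chars.isalnum (PySem.Chars.lowerChar c) <;> simp [pvClean, h]

lemma isspace_pvSwap (c : Char) (h : c = '_' ∨ c = '-' ∨ PySem.Chars.isspace c) :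
    PySem.Chars.isspace (pvSwap c) := by
  rcases h with h | h | h
  · simp [pvSwap, h]; decide
  · simp [pvSwap, h]; decide
  · by_cases h2 : c = '_' ∨ c = '-'
    · simp [pvSwap, h2]; decide
    · simpa [pvSwap, h2] using h

lemma pvSwap_of_not_sep (c : Char) (h : ¬ (c = '_' ∨ c = '-' ∨ PySem.Chars.isspace c)) :
    pvSwap c = c := by
  simp only [not_or] at h
  simp [pvSwap, h.1, h.2.1]

-- the heart: the scanner run to completion equals A's loop over the remaining tokens
lemma scanB_eq_loopA (limit : Int) : ∀ (cs r : List Char) (terms : List String),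
    scanB limit (cs ++ [' ']) (pvClean r) terms
      = loopA limit ((tok (cs.map pvSwap) r.reverse).map String.ofList) terms := by
  intro cs
  induction cs with
  | nil =>
    intro r terms
    have hsep : (' ' = '_' ∨ ' ' = '-' ∨ PySem.Chars.isspace ' ') := by right; right; decide
    by_cases hr : r = []
    · subst hr
      simp [scanB, tok, loopA, hsep, pvClean]
    · have hrr : r.reverse ≠ [] := by simpa using hr
      simp only [List.nil_append, List.map_nil, tok, if_neg hrr, List.reverse_reverse,
        List.map_cons, List.map_nil, scanB, if_pos hsep, loopA, pvCleanA_ofList]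
      by_cases h4 : 4 ≤ (pvClean r).length
      · have hlen : ¬ (PySem.Str.len (String.ofList (pvClean r)) < 4) := by
          simp [PySem.Str.len]; omega
        by_cases hmem : String.ofList (pvClean r) ∈ terms
        · simp [h4, hmem, hlen, scanB, loopA]
        · by_cases hlim : limit ≤ PySem.List.len (terms ++ [String.ofList (pvClean r)])
          · simp [h4, hmem, hlen, hlim]
          · simp [h4, hmem, hlen, hlim, scanB, loopA]
      · have hlen : PySem.Str.len (String.ofList (pvClean r)) < 4 := by
          simp [PySem.Str.len]; omega
        simp [h4, hlen, scanB, loopA]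
  | cons c rest ih =>
    intro r terms
    by_cases hsep : c = '_' ∨ c = '-' ∨ PySem.Chars.isspace c
    · have hs : PySem.Chars.isspace (pvSwap c) := isspace_pvSwap c hsep
      have ihnil := fun terms => ih [] terms
      simp only [pvClean, List.map_nil, List.filter_nil] at ihnil
      by_cases hr : r = []
      · subst hr
        simp only [List.cons_append, scanB, if_pos hsep, List.map_cons, tok, if_pos hs,
          List.reverse_nil, if_pos rfl, pvClean, List.map_nil, List.filter_nil,
          List.length_nil]
        simp [ihnil]
      · have hrr : r.reverse ≠ [] := by simpa using hr
        simp only [List.cons_append, scanB, if_pos hsep, List.map_cons, tok, if_pos hs,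
          if_neg hrr, List.reverse_reverse, List.map_cons, loopA, pvCleanA_ofList]
        by_cases h4 : 4 ≤ (pvClean r).length
        · have hlen : ¬ (PySem.Str.len (String.ofList (pvClean r)) < 4) := by
            simp [PySem.Str.len]; omega
          have h4n : ¬ ((pvClean r).length < 4) := by omega
          by_cases hmem : String.ofList (pvClean r) ∈ terms
          · simp [h4, h4n, hmem, hlen, ihnil]
          · by_cases hlim : limit ≤ (terms.length : Int) + 1
            · simp [h4, h4n, hmem, hlen, hlim]
            · simp [h4, h4n, hmem, hlen, hlim, ihnil]
        · have hlen : PySem.Str.len (String.ofList (pvClean r)) < 4 := by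
            simp [PySem.Str.len]; omega
          have h4n : (pvClean r).length < 4 := by omega
          simp [h4, h4n, hlen, ihnil]
    · have hsw : pvSwap c = c := pvSwap_of_not_sep c hsep
      have hns : ¬ PySem.Chars.isspace c = true := by
        intro h; exact hsep (Or.inr (Or.inr h))
      simp only [List.cons_append, scanB, if_neg hsep, List.map_cons, hsw, tok, if_neg hns]
      have hrev : c :: r.reverse = (r ++ [c]).reverse := by simp
      rw [hrev]
      by_cases ha : PySem.Chars.isalnum (PySem.Chars.lowerChar c)
      · simpa [ha, pvClean_append_one, ha] using ih (r ++ [c]) terms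
      · simpa [ha, pvClean_append_one, ha] using ih (r ++ [c]) terms

lemma pvSwap_comp (c : Char) :
    (fun x => if x = '-' then ' ' else x) ((fun x => if x = '_' then ' ' else x) c) = pvSwap c := by
  by_cases h1 : c = '_'
  · simp [h1, pvSwap]
  · by_cases h2 : c = '-' <;> simp [h1, h2, pvSwap]

-- ===== VERDICT (by name: the statement is the Claim_ definition above) =====
theorem terms_from_text_py_spec : Claim_equal_terms_from_text_py := by
  intro text limit _
  unfold Spec_terms_from_text_py terms_from_text_py terms_from_text_py_alt
  have htl : (PySem.Str.replace (PySem.Str.replace text "_" " ") "-" " ").toList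
      = text.toList.map pvSwap := by
    rw [PySem.Str.toList_replace, PySem.Str.toList_replace]
    show PySem.Chars.replace (PySem.Chars.replace text.toList ['_'] [' ']) ['-'] [' ']
        = text.toList.map pvSwap
    rw [replace_single, replace_single, List.map_map]
    exact List.map_congr_left (fun c _ => pvSwap_comp c)
  rw [PySem.Str.split₀, htl]
  have : PySem.Chars.split₀ (text.toList.map pvSwap) = tok (text.toList.map pvSwap) [] := by
    simpa using split₀_go_tok (text.toList.map pvSwap) [] []
  rw [this]
  have := scanB_eq_loopA limit text.toList [] []
  simpa [pvClean] using this.symm
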